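-- pv_equiv track=rewrite | github.com/hafsunde/ESSGN-course | manim/assortative_long_range_ld.py | compute_contiguous_segments
-- ===== SOURCE A (Python) =====
-- def compute_contiguous_segments(source_pattern):
--     """
--     Group a recombination source pattern into contiguous chunks.
--
--     This lets the animation move segment-by-segment rather than one SNP at a
--     time, which is both clearer and closer to how recombination is usually
--     described pedagogically.
--     """
--     segments = []
--     start = 0
--     current_source = source_pattern[0]
--
--     for index in range(1, len(source_pattern) + 1):
--         if index == len(source_pattern) or source_pattern[index] != current_source:
--             segments.append(
--                 {
--                     "start": start,
--                     "end": index - 1,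
--                     "source": current_source,
--                 }
--             )
--             if index < len(source_pattern):
--                 start = index
--                 current_source = source_pattern[index]
--
--     return segments
-- ===== SOURCE B (Python) =====
-- def compute_contiguous_segments(source_pattern):
--     """Staged rewrite: pass 1 collects all boundary indices (positions where the
--     value changes, plus the two ends); pass 2 pairs consecutive boundaries into
--     segments.  No carried loop state."""
--     n = len(source_pattern)
--     bounds = [0] + [i for i in range(1, n) if source_pattern[i] != source_pattern[i - 1]] + [n]
--     return [{"start": s, "end": e - 1, "source": source_pattern[s]}
--             for s, e in zip(bounds, bounds[1:])]
-- ===== Notes on version B (the rewrite author's own statement) =====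
-- stated objective: simpler
-- what changed: Replaces A's single stateful sweep (carried start/current_source, boundary test per index) by a stateless staged computation: first build the full list of boundary indices (the two ends and the change points), then zip consecutive boundaries into segments.
import Mathlib
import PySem

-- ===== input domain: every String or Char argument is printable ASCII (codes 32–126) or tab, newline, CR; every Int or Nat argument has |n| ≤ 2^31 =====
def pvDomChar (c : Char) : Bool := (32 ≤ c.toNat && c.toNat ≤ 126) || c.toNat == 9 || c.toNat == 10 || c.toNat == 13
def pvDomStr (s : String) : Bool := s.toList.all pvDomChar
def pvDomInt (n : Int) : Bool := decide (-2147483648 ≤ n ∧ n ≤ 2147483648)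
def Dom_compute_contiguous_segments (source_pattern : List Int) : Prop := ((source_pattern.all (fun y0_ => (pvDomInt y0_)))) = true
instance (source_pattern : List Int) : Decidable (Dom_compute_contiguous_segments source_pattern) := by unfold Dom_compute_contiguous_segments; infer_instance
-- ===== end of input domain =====

-- B replaces A's stateful index sweep by a stateless staged computation (boundary
-- list, then pairwise zip into segments) — "simpler": shorter, no carried state.

-- ===== PORT A =====
-- the dict literal {"start": s, "end": e, "source": src}
def pvSeg (s e src : Int) : List (String × Int) :=
  [("start", s), ("end", e), ("source", src)]

-- the body of A's for-loop, named so the lemmas below can speak about it.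
-- `source_pattern[index]` is pyGetD with default 0: A only reads it when index ≠ n
-- (short-circuit `or`) resp. index < n, where it is in range.
def pvStep (sp : List Int) (n : Int)
    (s : List (List (String × Int)) × Int × Int) (index : Int) :
    List (List (String × Int)) × Int × Int :=
  let (segments, start, cur) := s
  if index = n ∨ PySem.List.pyGetD sp index 0 ≠ cur then
    let segments := segments ++ [pvSeg start (index - 1) cur]
    if index < n then (segments, index, PySem.List.pyGetD sp index 0)
    else (segments, start, cur)
  else (segments, start, cur)

-- Literal port of A: state (segments, start, current_source) folded over
-- range(1, len+1); the initial read of the first element is in range on Pre_ (nonempty input).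
def compute_contiguous_segments (source_pattern : List Int) : List (List (String × Int)) :=
  let n : Int := PySem.List.len source_pattern
  ((PySem.List.pyRange 1 (n + 1) 1).foldl (pvStep source_pattern n)
    ([], 0, PySem.List.pyGetD source_pattern 0 0)).1

-- ===== PORT B =====
-- the comprehension's condition 'source_pattern[i] != source_pattern[i-1]'
def pvChg (sp : List Int) (i : Int) : Bool :=
  PySem.List.pyGetD sp i 0 != PySem.List.pyGetD sp (i - 1) 0

-- Literal port of Source B: bounds = [0] + [i for i in range(1, n) if chg] + [n];
-- then the comprehension over zip(bounds, bounds[1:]) (bounds[1:] = drop 1,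
-- exact for this nonnegative slice start).
def compute_contiguous_segments_alt (source_pattern : List Int) : List (List (String × Int)) :=
  let n : Int := PySem.List.len source_pattern
  let bounds : List Int :=
    0 :: ((PySem.List.pyRange 1 n 1).filter (pvChg source_pattern) ++ [n])
  (bounds.zip (bounds.drop 1)).map
    (fun se => pvSeg se.1 (se.2 - 1) (PySem.List.pyGetD source_pattern se.1 0))

-- ===== PRECONDITION & SPEC =====
-- Pre_ excludes only the empty list, on which A raises IndexError reading the first element
-- (B raises there too).
def Pre_compute_contiguous_segments (source_pattern : List Int) : Prop := source_pattern ≠ []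
instance (source_pattern : List Int) : Decidable (Pre_compute_contiguous_segments source_pattern) := by unfold Pre_compute_contiguous_segments; infer_instance

def pvWitness_compute_contiguous_segments : List Int := [1, 1, 2]

def Spec_compute_contiguous_segments (source_pattern : List Int) (out : List (List (String × Int))) : Prop := out = compute_contiguous_segments_alt source_pattern
instance (source_pattern : List Int) (out : List (List (String × Int))) : Decidable (Spec_compute_contiguous_segments source_pattern out) := by unfold Spec_compute_contiguous_segments; infer_instance

-- ===== CLAIM (what is proved, stated in full; the proofs are below) =====
def Claim_equal_compute_contiguous_segments : Prop := ∀ (source_pattern : List Int), Dom_compute_contiguous_segments source_pattern → Pre_compute_contiguous_segments source_pattern → Spec_compute_contiguous_segments source_pattern (compute_contiguous_segments source_pattern)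

-- ===== LEMMAS AND PROOFS =====

-- proof-side common reference shape: the run recursion both programs are proved equal to.
-- inner scan: advance j while j < n and sp[j] == source (fuel ≥ n - j suffices)
def pvRunEnd (sp : List Int) (n source : Int) : Nat → Int → Int
  | 0, j => j
  | fuel + 1, j =>
    if j < n ∧ PySem.List.pyGetD sp j 0 = source then pvRunEnd sp n source fuel (j + 1)
    else j

-- one segment per run (fuel ≥ n - i suffices)
def pvAltGo (sp : List Int) (n : Int) : Nat → Int → List (List (String × Int))
  | 0, _ => []
  | fuel + 1, i =>
    if i < n then
      let source := PySem.List.pyGetD sp i 0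
      let j := pvRunEnd sp n source fuel (i + 1)
      pvSeg i (j - 1) source :: pvAltGo sp n fuel j
    else []

-- B's pairing step, as a function of the bounds list (proof-side name for B's body)
def pvPairs (sp : List Int) (xs : List Int) : List (List (String × Int)) :=
  (xs.zip (xs.drop 1)).map (fun se => pvSeg se.1 (se.2 - 1) (PySem.List.pyGetD sp se.1 0))

theorem pvRunEnd_ge (sp : List Int) (n source : Int) (fuel : Nat) :
    ∀ j : Int, j ≤ pvRunEnd sp n source fuel j := by
  induction fuel with
  | zero => intro j; simp [pvRunEnd]
  | succ fuel ih =>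
    intro j
    simp only [pvRunEnd]
    split
    · exact le_trans (by omega) (ih (j + 1))
    · omega

theorem pvRunEnd_le (sp : List Int) (n source : Int) (fuel : Nat) :
    ∀ j : Int, j ≤ n → pvRunEnd sp n source fuel j ≤ n := by
  induction fuel with
  | zero => intro j hj; simpa [pvRunEnd] using hj
  | succ fuel ih =>
    intro j hj
    simp only [pvRunEnd]
    split
    · next hc => exact ih (j + 1) (by omega)
    · exact hj

theorem pvRunEnd_stop (sp : List Int) (n source : Int) (fuel : Nat) :
    ∀ j : Int, n - j ≤ (fuel : Int) →
    pvRunEnd sp n source fuel j < n →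
    PySem.List.pyGetD sp (pvRunEnd sp n source fuel j) 0 ≠ source := by
  induction fuel with
  | zero =>
    intro j hf hlt
    simp only [pvRunEnd] at hlt
    omega
  | succ fuel ih =>
    intro j hf hlt
    simp only [pvRunEnd] at hlt ⊢
    split
    · next hc =>
      rw [if_pos hc] at hlt
      exact ih (j + 1) (by push_cast at hf ⊢; omega) hlt
    · next hc =>
      rw [if_neg hc] at hlt
      intro hget
      exact hc ⟨hlt, hget⟩

-- every index strictly inside the scanned run still holds the run's source value
theorem pvRunEnd_all (sp : List Int) (n source : Int) (fuel : Nat) :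
    ∀ j k : Int, j ≤ k → k < pvRunEnd sp n source fuel j →
    PySem.List.pyGetD sp k 0 = source := by
  induction fuel with
  | zero => intro j k hjk hk; simp only [pvRunEnd] at hk; omega
  | succ fuel ih =>
    intro j k hjk hk
    simp only [pvRunEnd] at hk
    split at hk
    · next hc =>
      by_cases hkj : k = j
      · exact hkj ▸ hc.2
      · exact ih (j + 1) k (by omega) hk
    · omega

-- skipping over the interior of a run leaves A's fold state unchanged
theorem pvSkip (sp : List Int) (n source : Int) (fuel : Nat) :
    ∀ (j : Int) (segs : List (List (String × Int))) (start : Int),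
    (PySem.List.pyRange j (n + 1) 1).foldl (pvStep sp n) (segs, start, source)
      = (PySem.List.pyRange (pvRunEnd sp n source fuel j) (n + 1) 1).foldl (pvStep sp n) (segs, start, source) := by
  induction fuel with
  | zero => intro j segs start; rfl
  | succ fuel ih =>
    intro j segs start
    simp only [pvRunEnd]
    split
    · next hc =>
      rw [PySem.List.pyRange_one_cons (by omega : j < n + 1)]
      have hstep : pvStep sp n (segs, start, source) j = (segs, start, source) := by
        simp only [pvStep]
        exact if_neg (fun hor => hor.elim (fun h1 => absurd h1 (by omega)) (fun h2 => h2 hc.2))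
      rw [List.foldl_cons, hstep]
      exact ih (j + 1) segs start
    · rfl

theorem pvAltGo_eq_nil (sp : List Int) (n : Int) (fuel : Nat) (i : Int) (h : ¬ i < n) :
    pvAltGo sp n fuel i = [] := by
  cases fuel with
  | zero => rfl
  | succ fuel => simp only [pvAltGo]; rw [if_neg h]

-- A-side invariant: from the start of a run, A's fold appends exactly the run recursion's segments
theorem pvMain (sp : List Int) (n : Int) (fuel : Nat) :
    ∀ (i : Int), i < n → n - i ≤ (fuel : Int) →
    ∀ (segs : List (List (String × Int))),
    ((PySem.List.pyRange (i + 1) (n + 1) 1).foldl (pvStep sp n)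
        (segs, i, PySem.List.pyGetD sp i 0)).1
      = segs ++ pvAltGo sp n fuel i := by
  induction fuel with
  | zero => intro i hi hf segs; omega
  | succ fuel ih =>
    intro i hi hf segs
    rw [pvSkip sp n (PySem.List.pyGetD sp i 0) fuel (i + 1) segs i]
    simp only [pvAltGo]
    rw [if_pos hi]
    show _ = segs ++ (pvSeg i (pvRunEnd sp n (PySem.List.pyGetD sp i 0) fuel (i + 1) - 1)
        (PySem.List.pyGetD sp i 0) :: pvAltGo sp n fuel (pvRunEnd sp n (PySem.List.pyGetD sp i 0) fuel (i + 1)))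
    have he1 : i + 1 ≤ pvRunEnd sp n (PySem.List.pyGetD sp i 0) fuel (i + 1) :=
      pvRunEnd_ge sp n (PySem.List.pyGetD sp i 0) fuel (i + 1)
    have he2 : pvRunEnd sp n (PySem.List.pyGetD sp i 0) fuel (i + 1) ≤ n :=
      pvRunEnd_le sp n (PySem.List.pyGetD sp i 0) fuel (i + 1) (by omega)
    by_cases hen : pvRunEnd sp n (PySem.List.pyGetD sp i 0) fuel (i + 1) = n
    · rw [hen]
      rw [PySem.List.pyRange_one_singleton, List.foldl_cons, List.foldl_nil]
      rw [pvAltGo_eq_nil sp n fuel n (lt_irrefl n)]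
      simp [pvStep]
    · have hlt : pvRunEnd sp n (PySem.List.pyGetD sp i 0) fuel (i + 1) < n := by omega
      rw [PySem.List.pyRange_one_cons (by omega), List.foldl_cons]
      have hstop := pvRunEnd_stop sp n (PySem.List.pyGetD sp i 0) fuel (i + 1) (by omega) hlt
      have hstep : pvStep sp n (segs, i, PySem.List.pyGetD sp i 0)
            (pvRunEnd sp n (PySem.List.pyGetD sp i 0) fuel (i + 1))
          = (segs ++ [pvSeg i (pvRunEnd sp n (PySem.List.pyGetD sp i 0) fuel (i + 1) - 1) (PySem.List.pyGetD sp i 0)],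
             pvRunEnd sp n (PySem.List.pyGetD sp i 0) fuel (i + 1),
             PySem.List.pyGetD sp (pvRunEnd sp n (PySem.List.pyGetD sp i 0) fuel (i + 1)) 0) := by
        simp only [pvStep]
        rw [if_pos (Or.inr hstop), if_pos hlt]
      rw [hstep]
      rw [ih (pvRunEnd sp n (PySem.List.pyGetD sp i 0) fuel (i + 1)) hlt (by push_cast at hf ⊢; omega)]
      simp

-- B-side: the change-point list from i+1 splits at the run's end
theorem pvChangesSplit (sp : List Int) (n : Int) (fuel : Nat) (i : Int)
    (hi : 0 ≤ i) (hin : i < n) (hf : n - (i + 1) ≤ (fuel : Int)) :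
    (PySem.List.pyRange (i + 1) n 1).filter (pvChg sp)
      = (if h : pvRunEnd sp n (PySem.List.pyGetD sp i 0) fuel (i + 1) < n then
          pvRunEnd sp n (PySem.List.pyGetD sp i 0) fuel (i + 1)
            :: (PySem.List.pyRange (pvRunEnd sp n (PySem.List.pyGetD sp i 0) fuel (i + 1) + 1) n 1).filter (pvChg sp)
        else []) := by
  set source := PySem.List.pyGetD sp i 0 with hsrc
  set j := pvRunEnd sp n source fuel (i + 1) with hj
  have he1 : i + 1 ≤ j := pvRunEnd_ge sp n source fuel (i + 1)
  have he2 : j ≤ n := pvRunEnd_le sp n source fuel (i + 1) (by omega)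
  have hall : ∀ k : Int, i + 1 ≤ k → k < j → PySem.List.pyGetD sp k 0 = source :=
    fun k hk1 hk2 => pvRunEnd_all sp n source fuel (i + 1) k hk1 hk2
  have hprev : ∀ k : Int, i ≤ k → k < j → PySem.List.pyGetD sp k 0 = source := by
    intro k hk1 hk2
    by_cases hki : k = i
    · rw [hki, hsrc]
    · exact hall k (by omega) hk2
  have hsplit : PySem.List.pyRange (i + 1) n 1
      = PySem.List.pyRange (i + 1) j 1 ++ PySem.List.pyRange j n 1 :=
    PySem.List.pyRange_one_append (i + 1) j n he1 he2
  have hnil : (PySem.List.pyRange (i + 1) j 1).filter (pvChg sp) = [] := by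
    rw [List.filter_eq_nil_iff]
    intro k hk
    rw [PySem.List.mem_pyRange_one] at hk
    simp only [pvChg, bne_iff_ne, ne_eq, Decidable.not_not]
    rw [hprev k (by omega) (by omega), hprev (k - 1) (by omega) (by omega)]
  rw [hsplit, List.filter_append, hnil, List.nil_append]
  by_cases hlt : j < n
  · rw [dif_pos hlt]
    rw [PySem.List.pyRange_one_cons hlt]
    have hstop : PySem.List.pyGetD sp j 0 ≠ source :=
      pvRunEnd_stop sp n source fuel (i + 1) (by omega) hlt
    have hchg : pvChg sp j = true := by
      simp only [pvChg, bne_iff_ne, ne_eq]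
      rw [hprev (j - 1) (by omega) (by omega)]
      exact hstop
    rw [List.filter_cons, if_pos hchg]
  · rw [dif_neg hlt]
    rw [PySem.List.pyRange_one_eq_nil (by omega), List.filter_nil]

-- B-side invariant: from the start of a run, pairing the remaining bounds gives the run recursion
theorem pvBMain (sp : List Int) (n : Int) (fuel : Nat) :
    ∀ (i : Int), 0 ≤ i → i < n → n - i ≤ (fuel : Int) →
    pvPairs sp (i :: ((PySem.List.pyRange (i + 1) n 1).filter (pvChg sp) ++ [n]))
      = pvAltGo sp n fuel i := by
  induction fuel with
  | zero => intro i h0 hi hf; omega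
  | succ fuel ih =>
    intro i h0 hi hf
    simp only [pvAltGo]
    rw [if_pos hi]
    set source := PySem.List.pyGetD sp i 0 with hsrc
    set j := pvRunEnd sp n source fuel (i + 1) with hj
    have he1 : i + 1 ≤ j := pvRunEnd_ge sp n source fuel (i + 1)
    have he2 : j ≤ n := pvRunEnd_le sp n source fuel (i + 1) (by omega)
    rw [pvChangesSplit sp n fuel i h0 hi (by push_cast at hf ⊢; omega)]
    by_cases hlt : j < n
    · rw [dif_pos hlt]
      show pvPairs sp (i :: j :: ((PySem.List.pyRange (j + 1) n 1).filter (pvChg sp) ++ [n])) = _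
      have hcons : pvPairs sp (i :: j :: ((PySem.List.pyRange (j + 1) n 1).filter (pvChg sp) ++ [n]))
          = pvSeg i (j - 1) source
            :: pvPairs sp (j :: ((PySem.List.pyRange (j + 1) n 1).filter (pvChg sp) ++ [n])) := by
        simp [pvPairs, List.zip, hsrc]
      rw [hcons, ih j (by omega) hlt (by push_cast at hf ⊢; omega)]
    · rw [dif_neg hlt]
      have hjn : j = n := by omega
      rw [pvAltGo_eq_nil sp n fuel j (by omega)]
      show pvPairs sp [i, n] = [pvSeg i (j - 1) source]
      simp [pvPairs, List.zip, hjn, hsrc]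

-- ===== VERDICT (by name: the statement is the Claim_ definition above) =====
theorem compute_contiguous_segments_spec : Claim_equal_compute_contiguous_segments := by
  intro sp hd hp
  unfold Spec_compute_contiguous_segments
  have hlen : sp.length ≠ 0 := fun h => hp (List.eq_nil_of_length_eq_zero h)
  have hn : (0 : Int) < PySem.List.len sp := by
    simp [PySem.List.len_eq]; omega
  have hA := pvMain sp (PySem.List.len sp) sp.length 0 hn (by simp [PySem.List.len_eq]) []
  have hB := pvBMain sp (PySem.List.len sp) sp.length 0 le_rfl hn (by simp [PySem.List.len_eq])
  norm_num at hA hB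
  simp only [compute_contiguous_segments, compute_contiguous_segments_alt, PySem.List.len_eq]
  rw [hA, ← hB]
  rfl
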